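/- GENERATED by tools/from_farm_form.py from prooffarm-gif/accepted/DGifSlurp.5/Lemmas.lean (a worked proof of the farm's unit `DGifSlurp.5`,
   accepted by the verdict) — do not edit. -/
import Gif.Spec.Units.DGifSlurp_5
import Gif.Spec.AllSegs

open X86 X86.User Asan ProgX.Base ProgX.Base.Spec Gif.Spec

set_option maxRecDepth 4000
set_option maxHeartbeats 4000000

namespace Gif.Spec.DGifSlurp_5

/-- **`imul ebx, ecx ; movsxd rsi, ebx` of two factors whose product is an `int`** (dgif_lib.c:1216 `ImageSize = Width * Height`):
the 32-bit product is exact, and so is its sign extension. -/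
theorem seg5_imul (wd ht : Word) (W Hh : Nat) (h1 : wd.toNat = W) (h2 : ht.toNat = Hh) (hw : 1 ≤ W) (hh : 1 ≤ Hh)
    (h : W * Hh < 2 ^ 31) :
    (Word.ofBV (BitVec.signExtend 64 (Word.part Width.w32 wd * Word.part Width.w32 ht))).toNat = W * Hh ∧
    (Word.ofBV (Word.part Width.w32 wd * Word.part Width.w32 ht)).toNat = W * Hh := by
  have hW : W ≤ W * Hh := Nat.le_mul_of_pos_right W hh
  have hH : Hh ≤ W * Hh := Nat.le_mul_of_pos_left Hh hw
  have p1 : (Word.part Width.w32 wd).toNat = W := by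
    rw [toNat_part32, h1]
    omega
  have p2 : (Word.part Width.w32 ht).toNat = Hh := by
    rw [toNat_part32, h2]
    omega
  have p3 : (Word.part Width.w32 wd * Word.part Width.w32 ht).toNat = W * Hh := by
    rw [BitVec.toNat_mul, p1, p2]
    have e : Width.w32.bits = 32 := rfl
    rw [e]
    omega
  refine ⟨?_, ?_⟩
  · rw [toNat_sext32 _ (by rw [p3]; exact h)]
    exact p3
  · rw [toNat_ofBV32]
    exact p3

/-- **THE STORE TO `sp->RasterBits`** (dgif_lib.c:1222; 10A799H `mov [r12 + 20H], r13`), as a step of the shape: the 8 bytes at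
`slot + 32` of the LAST counted slot are stored to; the forest's last image becomes `g'`, which has the colour map and the
extension list of `g`; what the new memory says of the raster field (`RasterAt g'.raster`) is the caller's obligation
(`Shape.set_saved` with `SavedAt.set_last`). -/
theorem seg5_set_raster {Hx : Heap} {Fc : Forest} {R : Rd} {mem : Mem} {s : Saved} {init : List Img} {g g' : Img}
    (hok : GifOK Hx Fc R mem) (hheap : HeapOK Hx mem) (hcur : 0x700000 ≤ R.cur ∧ R.cur + 16 ≤ 0x800000)
    (hs : Fc.saved = some s) (hi : s.imgs = init ++ [g]) (hcm : g'.cm = g.cm) (hext : g'.ext = g.ext)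
    (a : Word) (val : Nat) (ha : a.toNat = s.arr + 56 * init.length + 32)
    (hr : RasterAt g'.raster (s.arr + 56 * init.length) (mem.writeLE a 8 val)) :
    Shape { Fc with saved := some { s with imgs := init ++ [g'] } } R (mem.writeLE a 8 val) := by
  obtain ⟨arr, cap, imgs⟩ := s
  simp only at hi ha hr ⊢
  subst hi
  have hp := hok.owns.placed hheap
  have G := carry_Geo.intro hok.shape hp hheap hcur
  have hsv := hok.shape.saved
  rw [hs] at hsv
  have hsv0 := hsv
  obtain ⟨k1, k2, k3, k4, k5⟩ := hsv
  simp only at k1 k2 k3 k4 k5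
  have hlen : (init ++ [g]).length = init.length + 1 := by
    simp only [List.length_append, List.length_singleton]
  rw [hlen] at k3
  -- the array's object in the heap
  have hin : (arr, 56 * cap) ∈ Fc.owned := Forest.mem_owned_saved (by
    rw [hs]
    exact List.mem_cons_self)
  obtain ⟨c, hlc⟩ := hok.owns.live _ hin
  have hsc := hheap.size_le_cap hlc
  have hins := G.inData _ hlc
  simp only at hsc hins
  -- the window stored to, and what it misses
  have hsame : Mem.SameExcept [⟨a.toNat, a.toNat + 8⟩] mem (mem.writeLE a 8 val) :=
    Mem.SameExcept.writeLE _ mem a 8 val (by omega) ⟨_, List.mem_cons_self, Nat.le_refl _, Nat.le_refl _⟩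
  obtain ⟨m1, _, m3, _, _⟩ := G.in_obj hlc (w := ⟨a.toNat, a.toNat + 8⟩) (by
    simp only
    omega) (by
    simp only
    omega)
  simp only at m1 m3
  -- the structural windows of the array: the counted slots in front, then those of the images
  have hst : ∀ o, o ∈ Saved.structs (some ⟨arr, cap, init ++ [g]⟩) → o ∈ Fc.structs := by
    intro o ho
    apply carry_mem_structs_saved
    rw [hs]
    exact ho
  have harr : (arr, 56 * (init ++ [g]).length) ∈ Fc.structs := hst _ (by
    simp only [Saved.structs, List.mem_cons, true_or])
  have hbound : ∀ o, o ∈ Fc.structs → o.1 + o.2 < 2 ^ 64 := by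
    intro o ho
    obtain ⟨x, hx, e1, e2⟩ := G.structObj o ho
    have := G.inData x hx
    omega
  have himg : ∀ o, o ∈ (init ++ [g]).flatMap Img.structs → o ∈ Fc.structs ∧ o.1 ≠ arr := by
    intro o ho
    have hmem : o ∈ Fc.structs := hst o (by
      simp only [Saved.structs, List.mem_cons]
      exact Or.inr ho)
    refine ⟨hmem, ?_⟩
    have hsub : (Saved.structs Fc.saved).Sublist Fc.structs := by
      unfold Forest.structs
      exact (List.sublist_append_right _ _).trans (List.sublist_append_left _ _)
    have hpw := G.apart.sublist hsub
    rw [hs] at hpw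
    simp only [Saved.structs] at hpw
    have := (List.pairwise_cons.mp hpw).1 o ho
    simp only at this
    exact fun e => this e.symm
  have hkeep : ∀ o, o ∈ (init ++ [g]).flatMap Img.structs → Mem.EqOn o.1 (o.1 + o.2) mem (mem.writeLE a 8 val) := by
    intro o ho
    obtain ⟨hmem, hne⟩ := himg o ho
    apply hsame.eqOn
    intro w hw
    have e := List.mem_singleton.mp hw
    rw [e]
    have := m3 o hmem hne
    simp only
    omega
  have hgne := (G.struct_ne _ harr).1
  simp only at hgne
  obtain ⟨xg, hxg, eg, hcg⟩ := G.gifObj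
  have hgin := G.inData xg hxg
  have hmg := m1 hgne
  apply Shape.set_saved hok.shape hp hheap hcur hsame
  · intro w hw
    have e := List.mem_singleton.mp hw
    rw [e]
    right
    right
    right
    refine ⟨_, _, hs, hlc, rfl, ?_, ?_⟩
    · simp only
      omega
    · simp only
      omega
  · have f1 : GifFileType.SavedImages (mem.writeLE a 8 val) Fc.gif = GifFileType.SavedImages mem Fc.gif := by
      simp only [gfield]
      exact rd_writeLE_disjoint mem a 8 val _ 8 (by omega) (by omega) (by omega)
    have f2 : GifFileType.ImageCount (mem.writeLE a 8 val) Fc.gif = GifFileType.ImageCount mem Fc.gif := by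
      simp only [gfield]
      exact rd_writeLE_disjoint mem a 8 val _ 4 (by omega) (by omega) (by omega)
    rw [f1, f2]
    have hold : ImgAt (arr + 56 * init.length) g mem := by
      have := k5 init.length (by omega)
      simp only [List.getElem_append_right (Nat.le_refl _), Nat.sub_self, List.getElem_cons_zero] at this
      exact this
    have hgs : ∀ o, o ∈ Img.structs g → o ∈ (init ++ [g]).flatMap Img.structs := by
      intro o ho
      simp only [List.flatMap_append, List.flatMap_cons, List.flatMap_nil, List.append_nil, List.mem_append]
      exact Or.inr ho
    refine SavedAt.set_last (s := ⟨arr, cap, init ++ [g]⟩) hsv0 rfl ?_ ?_ ?_ ?_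
    · apply hsame.eqOn
      intro w hw
      have e := List.mem_singleton.mp hw
      rw [e]
      simp only
      omega
    · intro o ho
      apply hkeep
      simp only [List.flatMap_append, List.mem_append]
      exact Or.inl ho
    · intro o ho
      exact hbound o (hst o ho)
    · have e1 : SavedImage.ImageDesc.ColorMap (mem.writeLE a 8 val) (arr + 56 * init.length) =
          SavedImage.ImageDesc.ColorMap mem (arr + 56 * init.length) := by
        simp only [gfield]
        exact rd_writeLE_disjoint mem a 8 val _ 8 (by omega) (by omega) (by omega)
      have e3 : SavedImage.ExtensionBlockCount (mem.writeLE a 8 val) (arr + 56 * init.length) =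
          SavedImage.ExtensionBlockCount mem (arr + 56 * init.length) := by
        simp only [gfield]
        exact rd_writeLE_disjoint mem a 8 val _ 4 (by omega) (by omega) (by omega)
      have e4 : SavedImage.ExtensionBlocks (mem.writeLE a 8 val) (arr + 56 * init.length) =
          SavedImage.ExtensionBlocks mem (arr + 56 * init.length) := by
        simp only [gfield]
        exact rd_writeLE_disjoint mem a 8 val _ 8 (by omega) (by omega) (by omega)
      refine ⟨?_, hr, ?_⟩
      · rw [hcm, e1]
        apply hold.cm.frame
        · intro o ho
          exact hkeep o (hgs o (List.mem_append_left _ ho))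
        · intro x hx
          have hm : (x.obj, 24) ∈ Img.structs g := by
            unfold Img.structs
            rw [hx]
            simp only [Map.structs, List.mem_append, List.mem_singleton, true_or]
          exact hbound _ (himg _ (hgs _ hm)).1
      · rw [hext, e3, e4]
        apply hold.ext.frame
        · intro o ho
          exact hkeep o (hgs o (List.mem_append_right _ ho))
        · intro x hx
          have hm : (x.arr, 24 * x.blocks.length) ∈ Img.structs g := by
            unfold Img.structs
            rw [hx]
            simp only [Exts.structs, List.mem_append, List.mem_singleton, or_true]
          exact hbound _ (himg _ (hgs _ hm)).1

/-- **`Env` at the entry of a callee of the body, for the PRESENT heap and forest** (`Env.at_call` of Gif/Spec/FrameCarry.lean asks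
for the entry's heap and forest; in DGifSlurp they have changed): the static clauses of `HeapPre` and the context come from the
entry's `Env`, the region from `SameRegion`, the invariants from the assertion `At`. -/
theorem seg5_env_at_call {H Hc : Heap} {rest : List Obj} {frames : List (Nat × FrameLayout)} {F Fc : Forest} {R : Rd} {e s : State}
    {base top lo : Nat} {Fl : FrameLayout} {mem : Mem} (henv : Env H rest frames F R e) (hreg : SameRegion H Hc)
    (hinv : HeapInv Hc rest ((base, Fl) :: frames) top mem) (hok : GifOK Hc Fc R mem)
    (hs : Mem.SameExcept [⟨lo, top⟩] mem s.mem) (hlo : 0x700000 ≤ lo) (htop : top ≤ (e.reg .rsp).toNat + 8)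
    (hsp : (s.reg .rsp).toNat + 8 ≤ top) (h8 : (s.reg .rsp).toNat % 8 = 0) (hlo' : 0x700000 ≤ (s.reg .rsp).toNat + 8) :
    Env Hc rest ((base, Fl) :: frames) Fc R s := by
  have hcur := henv.ctx.cursor_range henv.heap.inv.shadow
  have hhi := hinv.shadow.stack.hi
  have hoff := hinv.heap.offStack
  have hroom := hinv.heap.room
  have hb : Hc.base = 0x800000 := by
    rw [hreg.1]
    exact henv.heap.base
  have hl : Hc.limit = 0xC00000 := by
    rw [hreg.2]
    exact henv.heap.limit
  have hun : ShadowUntouched mem s.mem := by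
    apply hs.eqOn
    intro w hw
    have e := List.mem_singleton.mp hw
    rw [e]
    simp only
    omega
  have hinv' : HeapInv Hc rest ((base, Fl) :: frames) ((s.reg .rsp).toNat + 8) s.mem := by
    refine (hinv.sameExcept hun hs ?_).lower hsp (by omega) hlo'
    intro w hw
    have e := List.mem_singleton.mp hw
    rw [e]
    left
    left
    simp only
    omega
  refine ⟨⟨hinv', hb, hl, henv.heap.text, henv.heap.offText⟩, henv.ctx.push base Fl, ?_⟩
  apply hok.sameExcept hinv.heap ⟨hcur.1, hcur.2.1⟩ hs
  intro w hw
  have e := List.mem_singleton.mp hw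
  rw [e]
  apply Loose.stack hinv.heap
  · simp only
    omega
  · simp only
    omega
  · simp only
    omega

/-- **WHERE THE SavedImages ARRAY IS**, as numbers (what the walker, the check goals and the frame tactics need in the context): the
array's object is live, the last counted slot lies inside it (`length ≤ cap`), it meets neither gif nor pv, and it lies in the
used part of the heap's region. -/
theorem seg5_slot_geo {Hx : Heap} {Fc : Forest} {R : Rd} {mem : Mem} {s : Saved} {init : List Img} {g : Img}
    (hok : GifOK Hx Fc R mem) (hheap : HeapOK Hx mem) (hcur : 0x700000 ≤ R.cur ∧ R.cur + 16 ≤ 0x800000)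
    (hs : Fc.saved = some s) (hi : s.imgs = init ++ [g]) :
    Hx.Live s.arr (56 * s.cap) ∧ init.length + 1 ≤ s.cap ∧
    (s.arr + 56 * s.cap ≤ Fc.gif ∨ Fc.gif + 120 ≤ s.arr) ∧
    (s.arr + 56 * s.cap ≤ Fc.pv ∨ Fc.pv + 24936 ≤ s.arr) ∧
    Hx.base + 64 ≤ s.arr ∧ s.arr + 56 * s.cap + 32 ≤ Hx.base + 32 + Hx.used := by
  have hp := hok.owns.placed hheap
  have G := carry_Geo.intro hok.shape hp hheap hcur
  have hsv := hok.shape.saved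
  rw [hs] at hsv
  have hcap := hsv.2.2.1
  rw [hi] at hcap
  simp only [List.length_append, List.length_singleton] at hcap
  have hin : (s.arr, 56 * s.cap) ∈ Fc.owned := Forest.mem_owned_saved (by
    rw [hs]
    exact List.mem_cons_self)
  have hlive := hok.owns.live _ hin
  obtain ⟨c, hlc⟩ := hlive
  have hsc := hheap.size_le_cap hlc
  have hrg := hheap.obj_range hlc
  simp only at hsc hrg
  have harr : (s.arr, 56 * s.imgs.length) ∈ Fc.structs := by
    apply carry_mem_structs_saved
    rw [hs]
    simp only [Saved.structs, List.mem_cons, true_or]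
  obtain ⟨n1, n2⟩ := G.struct_ne _ harr
  simp only at n1 n2
  obtain ⟨m1, m2, _, _, _⟩ := G.in_obj hlc (w := ⟨s.arr, s.arr + 56 * s.cap⟩) (Nat.le_refl _) (by
    simp only
    omega)
  have h1 := m1 n1
  have h2 := m2 n2
  simp only at h1 h2
  exact ⟨⟨c, hlc⟩, hcap, h1, h2, hrg.1, by omega⟩

/-- **THE STORE TO `sp->RasterBits`, as a step of the three invariants** (dgif_lib.c:1222): the heap's invariant (a store into a
live object), the state invariant for the forest whose last image is `g'` (`seg5_set_raster`; that its objects are owned is a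
hypothesis: `owned_set_raster`), the reader's measure. -/
theorem seg5_store_raster {Hx : Heap} {rest : List Obj} {frames : List (Nat × FrameLayout)} {top : Nat} {Fc : Forest} {R : Rd}
    {mem : Mem} {s : Saved} {init : List Img} {g g' : Img}
    (hinv : HeapInv Hx rest frames top mem) (hok : GifOK Hx Fc R mem) (hcur : 0x700000 ≤ R.cur ∧ R.cur + 16 ≤ 0x800000)
    (hs : Fc.saved = some s) (hi : s.imgs = init ++ [g]) (hcm : g'.cm = g.cm) (hext : g'.ext = g.ext)
    (a : Word) (val : Nat) (ha : a.toNat = s.arr + 56 * init.length + 32)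
    (hr : RasterAt g'.raster (s.arr + 56 * init.length) (mem.writeLE a 8 val))
    (hown : Owns Hx ({ Fc with saved := some { s with imgs := init ++ [g'] } } : Forest).owned) :
    HeapInv Hx rest frames top (mem.writeLE a 8 val) ∧
    GifOK Hx { Fc with saved := some { s with imgs := init ++ [g'] } } R (mem.writeLE a 8 val) ∧
    rem R (mem.writeLE a 8 val) = rem R mem := by
  obtain ⟨hlive, hcap, _, _, hlo, hhi⟩ := seg5_slot_geo hok hinv.heap hcur hs hi
  have hoff := hinv.heap.offStack
  have hroom := hinv.heap.room
  have hlim := hinv.heap.hi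
  refine ⟨hinv.writeLE_live hlive a 8 val (by omega) (by omega), ⟨hown, ?_⟩, ?_⟩
  · exact seg5_set_raster hok hinv.heap hcur hs hi hcm hext a val ha hr
  · have hsame : Mem.SameExcept [⟨a.toNat, a.toNat + 8⟩] mem (mem.writeLE a 8 val) :=
      Mem.SameExcept.writeLE _ mem a 8 val (by omega) ⟨_, List.mem_cons_self, Nat.le_refl _, Nat.le_refl _⟩
    apply rem_sameExcept hsame (by omega)
    intro w hw
    have e := List.mem_singleton.mp hw
    rw [e]
    simp only
    omega

/-- **`Core` AT A LATER STATE OF THE BODY** whose memory differs from `v`'s in the function's stack below the body's stack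
pointer (the return address a call pushed, a callee's frame) and in a window of the heap's region or its shadow: the six saved registers'
slots, the return address and the footprint since the entry are carried once, here. -/
theorem seg5_core_carry {cut cut' : Word} {H : Heap} {rest : List Obj} {frames : List (Nat × FrameLayout)} {F : Forest} {R : Rd}
    {u₀ e : State} {ret : Word} {v v' : State} (hc : DGifSlurp.Core cut H rest frames F R u₀ e ret v) (lo a b : Nat)
    (hs : Mem.SameExcept [⟨lo, (e.reg .rsp).toNat - 152⟩, ⟨a, b⟩] v.mem v'.mem)
    (hroom : 0x700000 + 848 ≤ (e.reg .rsp).toNat) (htop : (e.reg .rsp).toNat + 8 ≤ 0x800000)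
    (hlo : (e.reg .rsp).toNat - 848 ≤ lo) (ha1 : 0x800000 ≤ a) (ha2 : b ≤ 0x1000020)
    (hrip : v'.rip = cut') (hrsp : v'.reg .rsp = e.reg .rsp - 152) (hrbp : v'.reg .rbp = v.reg .rbp)
    (hr14 : v'.reg .r14 = v.reg .r14) (hrem : rem R v'.mem = rem R v.mem) (hcode : (conv u₀).code.In v'.mem)
    (habi : (conv u₀).inv v') : DGifSlurp.Core cut' H rest frames F R u₀ e ret v' := by
  have hd : ∀ (off : Nat), off ≤ 48 → 8 ≤ off → ∀ w, w ∈ [(⟨lo, (e.reg .rsp).toNat - 152⟩ : Span), ⟨a, b⟩] →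
      (e.reg .rsp).toNat - off + 8 ≤ w.lo ∨ w.hi ≤ (e.reg .rsp).toNat - off := by
    intro off h1 h2 w hw
    simp only [List.mem_cons, List.not_mem_nil, or_false] at hw
    rcases hw with rfl | rfl
    · simp only
      omega
    · simp only
      omega
  exact {
    entry := hc.entry
    pre := hc.pre
    rip := hrip
    rsp := hrsp
    rbp := hrbp.trans hc.rbp
    r14 := hr14.trans hc.r14
    slot_r15 := slot_sameExcept hs (e.reg .rsp) 8 8 _ (by omega) (by omega) hc.slot_r15 (hd 8 (by omega) (by omega))
    slot_r14 := slot_sameExcept hs (e.reg .rsp) 16 8 _ (by omega) (by omega) hc.slot_r14 (hd 16 (by omega) (by omega))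
    slot_r13 := slot_sameExcept hs (e.reg .rsp) 24 8 _ (by omega) (by omega) hc.slot_r13 (hd 24 (by omega) (by omega))
    slot_r12 := slot_sameExcept hs (e.reg .rsp) 32 8 _ (by omega) (by omega) hc.slot_r12 (hd 32 (by omega) (by omega))
    slot_rbp := slot_sameExcept hs (e.reg .rsp) 40 8 _ (by omega) (by omega) hc.slot_rbp (hd 40 (by omega) (by omega))
    slot_rbx := slot_sameExcept hs (e.reg .rsp) 48 8 _ (by omega) (by omega) hc.slot_rbx (hd 48 (by omega) (by omega))
    slot_ra := by
      rw [hs.readLE (e.reg .rsp) 8 (by omega) ?_]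
      · exact hc.slot_ra
      · intro w hw
        simp only [List.mem_cons, List.not_mem_nil, or_false] at hw
        rcases hw with rfl | rfl
        · simp only
          omega
        · simp only
          omega
    rem := by
      rw [hrem]
      exact hc.rem
    same := by
      refine hc.same.step_same hs ?_
      intro w hw b h1 h2
      simp only [List.mem_cons, List.not_mem_nil, or_false] at hw
      rcases hw with rfl | rfl
      · refine ⟨_, List.mem_cons_self, ?_, ?_⟩
        · simp only at h1 ⊢
          omega
        · simp only at h2 ⊢
          omega
      · refine ⟨_, List.mem_cons_of_mem _ (List.mem_cons_of_mem _ List.mem_cons_self), ?_, ?_⟩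
        · simp only at h1 ⊢
          omega
        · simp only at h2 ⊢
          omega
    code := hcode
    abi := habi
  }

/-- **At 10A78CH (ret8), `openbsd_reallocarray(NULL, ImageSize, 1)` has returned**: `At` for the heap `Hx` (the entry's of the
segment, or that heap with the raster pushed), the forest UNCHANGED (the raster is not adopted yet); `r12 = sp`; `W`, `Hh` the
slot's `Width` and `Height`; `ebx = ImageSize`; `rax` is NULL, or the new object, which can be owned besides the forest's. -/
structure seg5_Ret8 (H : Heap) (rest : List Obj) (frames : List (Nat × FrameLayout)) (F : Forest) (R : Rd) (Hx : Heap)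
    (Fc : Forest) (m W Hh : Nat) (u₀ e : State) (ret : Word) (v : State) : Prop where
  at_ : DGifSlurp.At Gif.L.DGifSlurp.ret8 H rest frames F R Hx Fc u₀ e ret v
  lz : LZOK v.mem F.pv
  last : ∃ (s : Saved) (init : List Img) (g : Img), DGifSlurp.Last Fc s init g ∧ g.raster = none ∧
    (v.reg .r12).toNat = s.arr + 56 * init.length
  width : SavedImage.ImageDesc.Width v.mem (v.reg .r12).toNat = W
  height : SavedImage.ImageDesc.Height v.mem (v.reg .r12).toNat = Hh
  w_pos : 1 ≤ W
  h_pos : 1 ≤ Hh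
  size : W * Hh < 2 ^ 31
  rbx : (v.reg .rbx).toNat = W * Hh
  lt : rem R v.mem < m
  res : v.reg .rax = 0 ∨ Owns Hx (((v.reg .rax).toNat, W * Hh) :: Fc.owned)

/-- **10A777H … the call of openbsd_reallocarray … 10A78CH (ret8)** (dgif_lib.c:1216-1222): `imul ebx, ecx` (exact: `seg5_imul`),
`rsi = ImageSize`, `edx = 1`, `edi = 0`: `openbsd_reallocarray(NULL, ImageSize, 1)`. Its `AllocPost`, both arms: the allocation
fits (the heap is `Hc.push n (r16 n)`, `rax = Hc.next`, the state invariant through the call by `GifOK.through_alloc`, the new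
object ownable by `Owns.push_cons`), or not (`FailPost`: `rax = 0`, nothing but stack written). -/
theorem seg5_call (Lay : Layout) (hLay : Lay.hi = 0x1000000) (μ : Microarch) (hμ : UserX.MicroOK μ) (u₀ : State)
    (hcode : HasCodeNat Lay u₀ Gif.L.DGifSlurp.entry Gif.Code.code_DGifSlurp.nat Gif.L.DGifSlurp.size)
    (H : Heap) (rest : List Obj) (frames : List (Nat × FrameLayout)) (F : Forest) (R : Rd) (Hc : Heap) (Fc : Forest) (m : Nat)
    (e : State) (ret : Word)
    (h_ra : Calls Lay μ ProgX.Base.WayInv (ProgX.Base.conv u₀) Gif.L.openbsd_reallocarray.entry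
      (Gif.Spec.openbsd_reallocarray.spec Hc rest (DGifSlurp.framesIn frames e) 0 0))
    (v : State) (hat : DGifSlurp.Sized H rest frames F R Hc Fc m u₀ e ret v) :
    ReachVia Lay μ ProgX.Base.WayInv v (fun w => ∃ (Hx : Heap) (W Hh : Nat),
      seg5_Ret8 H rest frames F R Hx Fc m W Hh u₀ e ret w) := by
  obtain ⟨hatt, hlz, hlast, hrbx, hrcx, hwpos, hhpos, hsize, hlt⟩ := hat
  obtain ⟨hcore, hregion, hgif, hpv, hinv, hok⟩ := hatt
  obtain ⟨s, init, g, hL, hgr, hr12⟩ := hlast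
  have he := hcore.entry
  v_entry he
  obtain ⟨henv, hrdi, hcomplete⟩ := hcore.pre
  have w_rip := hcore.rip
  have c_rsp : v.reg .rsp = e.reg .rsp - 152 := hcore.rsp
  obtain ⟨wd, c_rbx⟩ : ∃ z, v.reg .rbx = z := ⟨_, rfl⟩
  obtain ⟨ht, c_rcx⟩ : ∃ z, v.reg .rcx = z := ⟨_, rfl⟩
  obtain ⟨sp, c_r12⟩ : ∃ z, v.reg .r12 = z := ⟨_, rfl⟩
  rw [c_r12] at hrbx hrcx hwpos hhpos hsize hr12
  rw [c_rbx] at hrbx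
  rw [c_rcx] at hrcx
  -- the slot's `Width` and `Height` as numbers, the product as a number
  obtain ⟨W, hW⟩ : ∃ W, SavedImage.ImageDesc.Width v.mem sp.toNat = W := ⟨_, rfl⟩
  obtain ⟨Hh, hHh⟩ : ∃ Hh, SavedImage.ImageDesc.Height v.mem sp.toNat = Hh := ⟨_, rfl⟩
  rw [hW] at hrbx hwpos hsize
  rw [hHh] at hrcx hhpos hsize
  obtain ⟨hsx, hbx⟩ := seg5_imul wd ht W Hh hrbx hrcx hwpos hhpos hsize
  have hnpos : 1 ≤ W * Hh := Nat.mul_pos hwpos hhpos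
  obtain ⟨n, hn⟩ : ∃ n, n = W * Hh := ⟨_, rfl⟩
  rw [← hn] at hsx hbx hsize hnpos
  have w_kept : RegsKept [.rsp] v v := RegsKept.refl _ _
  have w_eq : Mem.EqOn ProgX.Base.L.textLo ProgX.Base.L.textHi u₀.mem v.mem := ProgX.Base.conv_code_eqOn hcore.code
  have hdf := (show abiInv _ from hcore.abi).1
  have hmx := (show abiInv _ from hcore.abi).2
  have hsse := ProgX.Base.sseOK_of_abiInv hcore.abi
  have hcur := henv.ctx.cursor_range henv.heap.inv.shadow
  have hbase : Hc.base = 0x800000 := by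
    rw [hregion.1]
    exact henv.heap.base
  have hlimit : Hc.limit = 0xC00000 := by
    rw [hregion.2]
    exact henv.heap.limit
  have hnext := Hc.next_def
  have hroom := hinv.heap.room
  rw [hbase] at hnext
  rw [hbase, hlimit] at hroom
  -- the slots and the footprint
  have k_r15 : v.mem.readLE (e.reg .rsp - 8) 8 = (e.reg .r15).toNat := hcore.slot_r15
  have k_r14 : v.mem.readLE (e.reg .rsp - 16) 8 = (e.reg .r14).toNat := hcore.slot_r14
  have k_r13 : v.mem.readLE (e.reg .rsp - 24) 8 = (e.reg .r13).toNat := hcore.slot_r13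
  have k_r12 : v.mem.readLE (e.reg .rsp - 32) 8 = (e.reg .r12).toNat := hcore.slot_r12
  have k_rbp : v.mem.readLE (e.reg .rsp - 40) 8 = (e.reg .rbp).toNat := hcore.slot_rbp
  have k_rbx : v.mem.readLE (e.reg .rsp - 48) 8 = (e.reg .rbx).toNat := hcore.slot_rbx
  have k_ra : UInt64.ofNat (v.mem.readLE (e.reg .rsp) 8) = ret := hcore.slot_ra
  have hsame : Mem.SameExcept
    [⟨(e.reg .rsp).toNat - 848, (e.reg .rsp).toNat⟩,
     shadowSpan ((e.reg .rsp).toNat - 152) ((e.reg .rsp).toNat - 56),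
     ⟨0x800000, 0x1000020⟩,
     ⟨R.cur, R.cur + 8⟩] e.mem v.mem := hcore.same
  -- where the array and pv are
  have hsin : (s.arr, 56 * s.cap) ∈ Fc.owned := Forest.mem_owned_saved (by
    rw [hL.saved]
    exact List.mem_cons_self)
  obtain ⟨carr, hlarr⟩ := hok.owns.live _ hsin
  have harr1 := hinv.heap.obj_range hlarr
  have harr2 := hinv.heap.size_le_cap hlarr
  obtain ⟨cpv, hlpv⟩ := hok.pv_live
  have hpv1 := hinv.heap.obj_range hlpv
  have hpv2 := hinv.heap.size_le_cap hlpv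
  simp only at harr1 harr2 hpv1 hpv2
  rw [hbase] at harr1 hpv1
  rw [hpv] at hpv1
  have hsv := hok.shape.saved
  rw [hL.saved] at hsv
  have hcap := hsv.2.2.1
  rw [hL.imgs] at hcap
  simp only [List.length_append, List.length_singleton] at hcap
  clear hsv
  u_walk hcode [hμ.vendor] until [Gif.L.DGifSlurp.ret8] span [ProgX.Base.L.textLo, ProgX.Base.L.textHi] side (v_side)
  case call_inv =>
    v_inv
  case pre_10a787 =>
    have hinv1 : HeapInv Hc rest (DGifSlurp.framesIn frames e) ((s_10a787.reg .rsp).toNat + 8) s_10a787.mem := by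
      have e1 : (s_10a787.reg .rsp).toNat + 8 = (e.reg .rsp).toNat - 152 := by
        rw [w_rsp]
        u_omega
      rw [e1, w_mem]
      exact hinv.writeLE_out _ 8 _ (by u_omega) (Or.inl (by u_omega)) (Or.inl (by u_omega))
    refine ⟨⟨hinv1, hbase, hlimit, henv.heap.text, henv.heap.offText⟩, ?_, ?_, ?_, ?_, ?_⟩
    · rw [w_rsi, hsx]
      exact hnpos
    · rw [w_rsi, hsx]
      omega
    · rw [w_rdx]
      decide
    · rw [w_rdx]
      decide
    · left
      rw [w_rdi]
      decide
  -- 10A78CH (ret8): REALLOCARRAY HAS RETURNED. `optr = NULL`: `AllocPost` for `n` bytes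
  have hpost := w_post.1 (by
    rw [w_rdi_10a787]
    decide)
  have e0 : (Word.ofBV 0#32).toNat = 0 := by decide
  have e1 : (Word.ofBV 1#32).toNat = 1 := by decide
  rw [w_rsi_10a787, w_rdx_10a787, hsx, e1, Nat.mul_one] at hpost
  have e_top : (s_10a787.reg .rsp).toNat + 8 = (e.reg .rsp).toNat - 152 := by
    rw [w_rsp_10a787]
    u_omega
  unfold AllocPost FailPost at hpost
  rw [e_top] at hpost
  clear he_align
  by_cases hfit : Hc.Fits (r16 n)
  · -- THE ALLOCATION SUCCEEDED
    obtain ⟨hrax, hinv2⟩ := hpost.1 hfit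
    have hfn := hfit.next_le
    rw [hlimit] at hfn
    have h16 := le_r16 n
    v_after_call w_rsp_10a787 w_mem_10a787
    simp only [w_rsi_10a787, w_rdx_10a787, w_rdi_10a787, hsx, e0, e1, Nat.mul_one] at w_same
    simp only [shadowSpan, Nat.zero_sub, Nat.add_zero, Nat.zero_add] at w_same
    -- the slots, over the pushed return address and through the callee's footprint
    have hp_r15 : s_10a787.mem.readLE (e.reg .rsp - 8) 8 = (e.reg .r15).toNat := by
      rw [w_mem_10a787]
      u_frame k_r15
    rw [w_mem_10a787] at hp_r15
    have hs_r15 : s_10a787r.mem.readLE (e.reg .rsp - 8) 8 = (e.reg .r15).toNat := by u_frame hp_r15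
    have hp_r14 : s_10a787.mem.readLE (e.reg .rsp - 16) 8 = (e.reg .r14).toNat := by
      rw [w_mem_10a787]
      u_frame k_r14
    rw [w_mem_10a787] at hp_r14
    have hs_r14 : s_10a787r.mem.readLE (e.reg .rsp - 16) 8 = (e.reg .r14).toNat := by u_frame hp_r14
    have hp_r13 : s_10a787.mem.readLE (e.reg .rsp - 24) 8 = (e.reg .r13).toNat := by
      rw [w_mem_10a787]
      u_frame k_r13
    rw [w_mem_10a787] at hp_r13
    have hs_r13 : s_10a787r.mem.readLE (e.reg .rsp - 24) 8 = (e.reg .r13).toNat := by u_frame hp_r13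
    have hp_r12 : s_10a787.mem.readLE (e.reg .rsp - 32) 8 = (e.reg .r12).toNat := by
      rw [w_mem_10a787]
      u_frame k_r12
    rw [w_mem_10a787] at hp_r12
    have hs_r12 : s_10a787r.mem.readLE (e.reg .rsp - 32) 8 = (e.reg .r12).toNat := by u_frame hp_r12
    have hp_rbp : s_10a787.mem.readLE (e.reg .rsp - 40) 8 = (e.reg .rbp).toNat := by
      rw [w_mem_10a787]
      u_frame k_rbp
    rw [w_mem_10a787] at hp_rbp
    have hs_rbp : s_10a787r.mem.readLE (e.reg .rsp - 40) 8 = (e.reg .rbp).toNat := by u_frame hp_rbp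
    have hp_rbx : s_10a787.mem.readLE (e.reg .rsp - 48) 8 = (e.reg .rbx).toNat := by
      rw [w_mem_10a787]
      u_frame k_rbx
    rw [w_mem_10a787] at hp_rbx
    have hs_rbx : s_10a787r.mem.readLE (e.reg .rsp - 48) 8 = (e.reg .rbx).toNat := by u_frame hp_rbx
    have hpra : UInt64.ofNat (s_10a787.mem.readLE (e.reg .rsp) 8) = ret := by
      rw [w_mem_10a787]
      u_frame k_ra
    rw [w_mem_10a787] at hpra
    have hsra : UInt64.ofNat (s_10a787r.mem.readLE (e.reg .rsp) 8) = ret := by u_frame hpra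
    -- the footprint of the call since `v`, and since the entry
    have hs : Mem.SameExcept
      [⟨(e.reg .rsp).toNat - 848, (e.reg .rsp).toNat - 152⟩,
       ⟨0x800000, 0x800008⟩,
       ⟨Hc.next - 32, Hc.next - 8⟩,
       ⟨0xC00000 + Hc.next / 8, 0xC00000 + (Hc.next + n + 7) / 8⟩,
       ⟨Hc.next, Hc.next + n⟩] v.mem s_10a787r.mem := by u_same
    have hsame1 : Mem.SameExcept
      [⟨(e.reg .rsp).toNat - 848, (e.reg .rsp).toNat⟩,
       shadowSpan ((e.reg .rsp).toNat - 152) ((e.reg .rsp).toNat - 56),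
       ⟨0x800000, 0x1000020⟩,
       ⟨R.cur, R.cur + 8⟩] e.mem s_10a787r.mem := by
      simp only [shadowSpan] at hsame ⊢
      u_same
    clear w_same hsame
    -- every window of the call is loose for the OLD heap: the state invariant goes through, the heap has one more object
    have hok2 : GifOK (Hc.push n (r16 n)) Fc R s_10a787r.mem := by
      apply hok.through_alloc hinv.heap ⟨hcur.1, hcur.2.1⟩ hs
      intro w hw
      simp only [List.mem_cons, List.not_mem_nil, or_false] at hw
      rcases hw with rfl | rfl | rfl | rfl | rfl
      · apply Loose.stack hinv.heap
        · simp only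
          omega
        · simp only
          omega
        · simp only
          omega
      · apply Loose.cell hinv.heap ⟨hcur.1, hcur.2.1⟩
        · simp only
          omega
        · simp only
          omega
      · apply Loose.above hinv.heap ⟨hcur.1, hcur.2.1⟩
        · simp only
          omega
        · simp only
          omega
      · apply Loose.shadow hinv.heap hcur.2.1
        simp only
        omega
      · apply Loose.above hinv.heap ⟨hcur.1, hcur.2.1⟩
        · simp only
          omega
        · simp only
          omega
    have hlz2 : LZOK s_10a787r.mem F.pv := by
      apply hlz.sameExcept hs (by omega)
      intro w hw
      simp only [List.mem_cons, List.not_mem_nil, or_false] at hw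
      rcases hw with rfl | rfl | rfl | rfl | rfl
      all_goals (simp only; omega)
    have hrem2 : rem R s_10a787r.mem = rem R v.mem := by
      apply rem_sameExcept hs (by omega)
      intro w hw
      simp only [List.mem_cons, List.not_mem_nil, or_false] at hw
      rcases hw with rfl | rfl | rfl | rfl | rfl
      all_goals (simp only; omega)
    have hW2 : SavedImage.ImageDesc.Width s_10a787r.mem sp.toNat = W := by
      rw [← hW]
      simp only [gfield]
      apply hs.rd _ _ (by omega)
      intro w hw
      simp only [List.mem_cons, List.not_mem_nil, or_false] at hw
      rcases hw with rfl | rfl | rfl | rfl | rfl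
      all_goals (simp only; omega)
    have hH2 : SavedImage.ImageDesc.Height s_10a787r.mem sp.toNat = Hh := by
      rw [← hHh]
      simp only [gfield]
      apply hs.rd _ _ (by omega)
      intro w hw
      simp only [List.mem_cons, List.not_mem_nil, or_false] at hw
      rcases hw with rfl | rfl | rfl | rfl | rfl
      all_goals (simp only; omega)
    have er12 : s_10a787r.reg .r12 = sp := (w_kept.get .r12 rfl).trans c_r12
    refine ReachVia.done ⟨Hc.push n (r16 n), W, Hh, ?_⟩
    exact {
      at_ := {
        core := {
          entry := hcore.entry
          pre := hcore.pre
          rip := w_rip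
          rsp := w_rsp
          rbp := (w_kept.get .rbp rfl).trans hcore.rbp
          r14 := (w_kept.get .r14 rfl).trans hcore.r14
          slot_r15 := hs_r15
          slot_r14 := hs_r14
          slot_r13 := hs_r13
          slot_r12 := hs_r12
          slot_rbp := hs_rbp
          slot_rbx := hs_rbx
          slot_ra := hsra
          rem := by
            rw [hrem2]
            exact hcore.rem
          same := hsame1
          code := w_code
          abi := w_inv
        }
        region := hregion.trans (SameRegion.push Hc n (r16 n))
        gif := hgif
        pv := hpv
        inv := hinv2
        ok := hok2
      }
      lz := hlz2
      last := ⟨s, init, g, hL, hgr, by rw [er12]; exact hr12⟩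
      width := by
        rw [er12]
        exact hW2
      height := by
        rw [er12]
        exact hH2
      w_pos := hwpos
      h_pos := hhpos
      size := by
        rw [← hn]
        exact hsize
      rbx := by
        rw [w_rbx, hbx]
        exact hn
      lt := by
        rw [hrem2]
        exact hlt
      res := by
        right
        rw [hrax, ← hn]
        exact hok.owns.push_cons hinv.heap n (r16 n)
    }
  · -- THE ALLOCATION FAILED (`FailPost`): `rax = 0`, the same heap, nothing but stack written
    obtain ⟨hrax, hinv2, hunc, hstack⟩ := hpost.2 hfit
    clear w_same
    have w_same := hstack
    rw [w_rsp_10a787, w_mem_10a787] at w_same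
    have hp_r15 : s_10a787.mem.readLE (e.reg .rsp - 8) 8 = (e.reg .r15).toNat := by
      rw [w_mem_10a787]
      u_frame k_r15
    rw [w_mem_10a787] at hp_r15
    have hs_r15 : s_10a787r.mem.readLE (e.reg .rsp - 8) 8 = (e.reg .r15).toNat := by u_frame hp_r15
    have hp_r14 : s_10a787.mem.readLE (e.reg .rsp - 16) 8 = (e.reg .r14).toNat := by
      rw [w_mem_10a787]
      u_frame k_r14
    rw [w_mem_10a787] at hp_r14
    have hs_r14 : s_10a787r.mem.readLE (e.reg .rsp - 16) 8 = (e.reg .r14).toNat := by u_frame hp_r14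
    have hp_r13 : s_10a787.mem.readLE (e.reg .rsp - 24) 8 = (e.reg .r13).toNat := by
      rw [w_mem_10a787]
      u_frame k_r13
    rw [w_mem_10a787] at hp_r13
    have hs_r13 : s_10a787r.mem.readLE (e.reg .rsp - 24) 8 = (e.reg .r13).toNat := by u_frame hp_r13
    have hp_r12 : s_10a787.mem.readLE (e.reg .rsp - 32) 8 = (e.reg .r12).toNat := by
      rw [w_mem_10a787]
      u_frame k_r12
    rw [w_mem_10a787] at hp_r12
    have hs_r12 : s_10a787r.mem.readLE (e.reg .rsp - 32) 8 = (e.reg .r12).toNat := by u_frame hp_r12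
    have hp_rbp : s_10a787.mem.readLE (e.reg .rsp - 40) 8 = (e.reg .rbp).toNat := by
      rw [w_mem_10a787]
      u_frame k_rbp
    rw [w_mem_10a787] at hp_rbp
    have hs_rbp : s_10a787r.mem.readLE (e.reg .rsp - 40) 8 = (e.reg .rbp).toNat := by u_frame hp_rbp
    have hp_rbx : s_10a787.mem.readLE (e.reg .rsp - 48) 8 = (e.reg .rbx).toNat := by
      rw [w_mem_10a787]
      u_frame k_rbx
    rw [w_mem_10a787] at hp_rbx
    have hs_rbx : s_10a787r.mem.readLE (e.reg .rsp - 48) 8 = (e.reg .rbx).toNat := by u_frame hp_rbx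
    have hpra : UInt64.ofNat (s_10a787.mem.readLE (e.reg .rsp) 8) = ret := by
      rw [w_mem_10a787]
      u_frame k_ra
    rw [w_mem_10a787] at hpra
    have hsra : UInt64.ofNat (s_10a787r.mem.readLE (e.reg .rsp) 8) = ret := by u_frame hpra
    have hs : Mem.SameExcept [⟨(e.reg .rsp).toNat - 848, (e.reg .rsp).toNat - 152⟩] v.mem s_10a787r.mem := by u_same
    have hsame1 : Mem.SameExcept
      [⟨(e.reg .rsp).toNat - 848, (e.reg .rsp).toNat⟩,
       shadowSpan ((e.reg .rsp).toNat - 152) ((e.reg .rsp).toNat - 56),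
       ⟨0x800000, 0x1000020⟩,
       ⟨R.cur, R.cur + 8⟩] e.mem s_10a787r.mem := by
      simp only [shadowSpan] at hsame ⊢
      u_same
    clear w_same hsame hstack
    have hok2 : GifOK Hc Fc R s_10a787r.mem := by
      apply hok.sameExcept hinv.heap ⟨hcur.1, hcur.2.1⟩ hs
      intro w hw
      have ew := List.mem_singleton.mp hw
      rw [ew]
      apply Loose.stack hinv.heap
      · simp only
        omega
      · simp only
        omega
      · simp only
        omega
    have hlz2 : LZOK s_10a787r.mem F.pv := by
      apply hlz.sameExcept hs (by omega)
      intro w hw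
      have ew := List.mem_singleton.mp hw
      rw [ew]
      simp only
      omega
    have hrem2 : rem R s_10a787r.mem = rem R v.mem := by
      apply rem_sameExcept hs (by omega)
      intro w hw
      have ew := List.mem_singleton.mp hw
      rw [ew]
      simp only
      omega
    have hW2 : SavedImage.ImageDesc.Width s_10a787r.mem sp.toNat = W := by
      rw [← hW]
      simp only [gfield]
      apply hs.rd _ _ (by omega)
      intro w hw
      have ew := List.mem_singleton.mp hw
      rw [ew]
      simp only
      omega
    have hH2 : SavedImage.ImageDesc.Height s_10a787r.mem sp.toNat = Hh := by
      rw [← hHh]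
      simp only [gfield]
      apply hs.rd _ _ (by omega)
      intro w hw
      have ew := List.mem_singleton.mp hw
      rw [ew]
      simp only
      omega
    have er12 : s_10a787r.reg .r12 = sp := (w_kept.get .r12 rfl).trans c_r12
    refine ReachVia.done ⟨Hc, W, Hh, ?_⟩
    exact {
      at_ := {
        core := {
          entry := hcore.entry
          pre := hcore.pre
          rip := w_rip
          rsp := w_rsp
          rbp := (w_kept.get .rbp rfl).trans hcore.rbp
          r14 := (w_kept.get .r14 rfl).trans hcore.r14
          slot_r15 := hs_r15
          slot_r14 := hs_r14
          slot_r13 := hs_r13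
          slot_r12 := hs_r12
          slot_rbp := hs_rbp
          slot_rbx := hs_rbx
          slot_ra := hsra
          rem := by
            rw [hrem2]
            exact hcore.rem
          same := hsame1
          code := w_code
          abi := w_inv
        }
        region := hregion
        gif := hgif
        pv := hpv
        inv := hinv2
        ok := hok2
      }
      lz := hlz2
      last := ⟨s, init, g, hL, hgr, by rw [er12]; exact hr12⟩
      width := by
        rw [er12]
        exact hW2
      height := by
        rw [er12]
        exact hH2
      w_pos := hwpos
      h_pos := hhpos
      size := by
        rw [← hn]
        exact hsize
      rbx := by
        rw [w_rbx, hbx]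
        exact hn
      lt := by
        rw [hrem2]
        exact hlt
      res := Or.inl hrax
    }

/-- **10A78CH (ret8) … 10A7BDH | 10A948H, the allocation succeeded** (dgif_lib.c:1222-1230, 1241): `r13 = rax`, the checked store of
the raster to `sp->RasterBits` — THE ADOPTION: the forest's last image gets `raster := some (r, n)` (`seg5_store_raster`,
`owned_set_raster`) —, `test r13, r13 ; je` not taken (a live object is not NULL), the checked byte load of
`sp->ImageDesc.Interlace`: 0: to 10A7BDH (`NI`); otherwise `r15d = 0`, to the pass head 10A948H with `a = 4`. -/
theorem seg5_ok (Lay : Layout) (hLay : Lay.hi = 0x1000000) (μ : Microarch) (hμ : UserX.MicroOK μ) (u₀ : State)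
    (hcode : HasCodeNat Lay u₀ Gif.L.DGifSlurp.entry Gif.Code.code_DGifSlurp.nat Gif.L.DGifSlurp.size)
    (H : Heap) (rest : List Obj) (frames : List (Nat × FrameLayout)) (F : Forest) (R : Rd) (Hx : Heap) (Fc : Forest)
    (m W Hh : Nat) (e : State) (ret : Word)
    (h_asan_store8_noabort : Asan.SmallCheck Lay μ ProgX.Base.WayInv (ProgX.Base.CodeOK u₀) [.rax, .rcx, .rdx] 8
      ProgX.Base.L.__asan_store8_noabort.entry)
    (h_asan_load1_noabort : Asan.SmallCheck Lay μ ProgX.Base.WayInv (ProgX.Base.CodeOK u₀) [.rax, .rdx] 1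
      ProgX.Base.L.__asan_load1_noabort.entry)
    (v : State) (hat : seg5_Ret8 H rest frames F R Hx Fc m W Hh u₀ e ret v)
    (hown : Owns Hx (((v.reg .rax).toNat, W * Hh) :: Fc.owned)) :
    ReachVia Lay μ ProgX.Base.WayInv v (fun w =>
      (∃ (H' : Heap) (F' : Forest), DGifSlurp.NI H rest frames F R H' F' m u₀ e ret w) ∨
      (∃ (H' : Heap) (F' : Forest) (a : Nat), DGifSlurp.PassHead H rest frames F R H' F' m a u₀ e ret w) ∨
      DGifSlurp.Exit H rest frames F R u₀ e ret w) := by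
  obtain ⟨hatt, hlz, hlast, hW, hHh, hwpos, hhpos, hsize, hrbx, hlt, hres⟩ := hat
  obtain ⟨hcore, hregion, hgif, hpv, hinv, hok⟩ := hatt
  obtain ⟨s, init, g, hL, hgr, hr12⟩ := hlast
  have he := hcore.entry
  v_entry he
  obtain ⟨henv, hrdi, hcomplete⟩ := hcore.pre
  have w_rip := hcore.rip
  have c_rsp : v.reg .rsp = e.reg .rsp - 152 := hcore.rsp
  obtain ⟨r, c_rax⟩ : ∃ z, v.reg .rax = z := ⟨_, rfl⟩
  obtain ⟨sp, c_r12⟩ : ∃ z, v.reg .r12 = z := ⟨_, rfl⟩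
  obtain ⟨sz, c_rbx⟩ : ∃ z, v.reg .rbx = z := ⟨_, rfl⟩
  rw [c_r12] at hW hHh hr12
  rw [c_rax] at hown
  rw [c_rbx] at hrbx
  obtain ⟨n, hn⟩ : ∃ n, n = W * Hh := ⟨_, rfl⟩
  rw [← hn] at hown hsize hrbx
  have w_kept : RegsKept [.rsp] v v := RegsKept.refl _ _
  have w_eq : Mem.EqOn ProgX.Base.L.textLo ProgX.Base.L.textHi u₀.mem v.mem := ProgX.Base.conv_code_eqOn hcore.code
  have hdf := (show abiInv _ from hcore.abi).1
  have hmx := (show abiInv _ from hcore.abi).2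
  have hsse := ProgX.Base.sseOK_of_abiInv hcore.abi
  have hcur := henv.ctx.cursor_range henv.heap.inv.shadow
  have hbase : Hx.base = 0x800000 := by
    rw [hregion.1]
    exact henv.heap.base
  have hlimit : Hx.limit = 0xC00000 := by
    rw [hregion.2]
    exact henv.heap.limit
  have hroom := hinv.heap.room
  rw [hbase, hlimit] at hroom
  -- where the array is; the new object is not NULL
  obtain ⟨hlive, hcap, hoffg, hoffp, hlo, hhi⟩ := seg5_slot_geo hok hinv.heap ⟨hcur.1, hcur.2.1⟩ hL.saved hL.imgs
  rw [hbase] at hlo hhi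
  rw [hpv] at hoffp
  obtain ⟨cpv, hlpv⟩ := hok.pv_live
  have hpv1 := hinv.heap.obj_range hlpv
  have hpv2 := hinv.heap.size_le_cap hlpv
  simp only at hpv1 hpv2
  rw [hbase, hpv] at hpv1
  have hrlive : Hx.Live r.toNat n := hown.live _ List.mem_cons_self
  have hrge := live_base_ge hinv.heap hrlive
  -- the slots and the footprint
  have k_r15 : v.mem.readLE (e.reg .rsp - 8) 8 = (e.reg .r15).toNat := hcore.slot_r15
  have k_r14 : v.mem.readLE (e.reg .rsp - 16) 8 = (e.reg .r14).toNat := hcore.slot_r14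
  have k_r13 : v.mem.readLE (e.reg .rsp - 24) 8 = (e.reg .r13).toNat := hcore.slot_r13
  have k_r12 : v.mem.readLE (e.reg .rsp - 32) 8 = (e.reg .r12).toNat := hcore.slot_r12
  have k_rbp : v.mem.readLE (e.reg .rsp - 40) 8 = (e.reg .rbp).toNat := hcore.slot_rbp
  have k_rbx : v.mem.readLE (e.reg .rsp - 48) 8 = (e.reg .rbx).toNat := hcore.slot_rbx
  have k_ra : UInt64.ofNat (v.mem.readLE (e.reg .rsp) 8) = ret := hcore.slot_ra
  have hsame : Mem.SameExcept
    [⟨(e.reg .rsp).toNat - 848, (e.reg .rsp).toNat⟩,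
     shadowSpan ((e.reg .rsp).toNat - 152) ((e.reg .rsp).toNat - 56),
     ⟨0x800000, 0x1000020⟩,
     ⟨R.cur, R.cur + 8⟩] e.mem v.mem := hcore.same
  have hal : LiveIn (Hx.liveObjs ++ rest) (DGifSlurp.framesIn frames e) s.arr (56 * s.cap) :=
    hlive.liveIn rest _ (Nat.le_refl _) (Nat.le_refl _)
  clear he_align
  u_walk hcode [hμ.vendor] until [Gif.L.DGifSlurp.at_10a7bd, Gif.L.DGifSlurp.at_10a948] span [ProgX.Base.L.textLo, ProgX.Base.L.textHi] side (v_side)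
  case check_10a794 =>
    -- dgif_lib.c:1222 the store to `sp->RasterBits`: 8 bytes inside the live array
    have hun : ShadowUntouched v.mem s_10a794.mem := by v_untouched
    exact hal.accSmall hinv.shadow hun _ 8 (by decide) (by u_omega) (by u_omega)
  case check_10a7ac =>
    -- dgif_lib.c:1230 the load of `sp->ImageDesc.Interlace`: 1 byte inside the live array
    have hun : ShadowUntouched v.mem s_10a7ac.mem := by v_untouched
    exact hal.accSmall hinv.shadow hun _ 1 (by decide) (by u_omega) (by u_omega)
  · -- the exit from s_10a942
    -- the footprint since `v`: the two pushed return addresses (one slot), the store to `sp->RasterBits`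
    have hs : Mem.SameExcept
      [⟨(e.reg .rsp).toNat - 160, (e.reg .rsp).toNat - 152⟩,
       ⟨sp.toNat + 32, sp.toNat + 32 + 8⟩] v.mem s_10a942.mem := by
      rw [w_mem]
      u_same
    -- THE ADOPTION: the forest's last image gets the raster `(r, n)`
    have hown' := hown.perm (DGifSlurp.owned_set_raster Fc s init g r.toNat n hL.saved hL.imgs hgr).symm
    obtain ⟨hinvA, hokA, hremA⟩ := store_stack hinv hok ⟨hcur.1, hcur.2.1⟩ (e.reg .rsp - 160) 8 1091481
      (by u_omega) (by u_omega)
    have e32 : (sp + 32).toNat = s.arr + 56 * init.length + 32 := by u_omega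
    have hrl := r.toNat_lt
    have hr : RasterAt (some (r.toNat, n)) (s.arr + 56 * init.length)
        ((v.mem.writeLE (e.reg .rsp - 160) 8 1091481).writeLE (sp + 32) 8 r.toNat) := by
      have eW : SavedImage.ImageDesc.Width ((v.mem.writeLE (e.reg .rsp - 160) 8 1091481).writeLE (sp + 32) 8 r.toNat)
          (s.arr + 56 * init.length) = W := by
        rw [← hW, hr12]
        simp only [gfield]
        rw [rd_writeLE_disjoint _ _ _ _ _ _ (by u_omega) (by u_omega) (by u_omega)]
        rw [rd_writeLE_disjoint _ _ _ _ _ _ (by u_omega) (by u_omega) (by u_omega)]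
      have eH : SavedImage.ImageDesc.Height ((v.mem.writeLE (e.reg .rsp - 160) 8 1091481).writeLE (sp + 32) 8 r.toNat)
          (s.arr + 56 * init.length) = Hh := by
        rw [← hHh, hr12]
        simp only [gfield]
        rw [rd_writeLE_disjoint _ _ _ _ _ _ (by u_omega) (by u_omega) (by u_omega)]
        rw [rd_writeLE_disjoint _ _ _ _ _ _ (by u_omega) (by u_omega) (by u_omega)]
      unfold RasterAt
      simp only
      rw [eW, eH]
      refine ⟨?_, hn, hwpos, hhpos, hsize⟩
      simp only [gfield]
      rw [rd_writeLE_same _ (sp + 32) 8 r.toNat _ e32 (by decide)]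
      omega
    obtain ⟨hinvB, hokB, hremB⟩ := seg5_store_raster (g' := { g with raster := some (r.toNat, n) }) hinvA hokA
      ⟨hcur.1, hcur.2.1⟩ hL.saved hL.imgs rfl rfl (sp + 32) r.toNat e32 hr hown'
    obtain ⟨hinvC, hokC, hremC⟩ := store_stack hinvB hokB ⟨hcur.1, hcur.2.1⟩ (e.reg .rsp - 160) 8 1091505
      (by u_omega) (by u_omega)
    rw [← w_mem] at hinvC hokC hremC
    have hremF : rem R s_10a942.mem = rem R v.mem := (hremC.trans hremB).trans hremA
    clear hinvA hokA hremA hinvB hokB hremB hremC hr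
    -- what the exit assertions say of the new memory
    have hlz2 : LZOK s_10a942.mem F.pv := by
      apply hlz.sameExcept hs (by omega)
      intro w hw
      simp only [List.mem_cons, List.not_mem_nil, or_false] at hw
      rcases hw with rfl | rfl
      all_goals (simp only; omega)
    have er12 : s_10a942.reg .r12 = sp := (w_kept.get .r12 rfl).trans c_r12
    have hW2 : SavedImage.ImageDesc.Width s_10a942.mem sp.toNat = W := by
      rw [← hW]
      simp only [gfield]
      apply hs.rd _ _ (by omega)
      intro w hw
      simp only [List.mem_cons, List.not_mem_nil, or_false] at hw
      rcases hw with rfl | rfl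
      all_goals (simp only; omega)
    have hH2 : SavedImage.ImageDesc.Height s_10a942.mem sp.toNat = Hh := by
      rw [← hHh]
      simp only [gfield]
      apply hs.rd _ _ (by omega)
      intro w hw
      simp only [List.mem_cons, List.not_mem_nil, or_false] at hw
      rcases hw with rfl | rfl
      all_goals (simp only; omega)
    have habi : (conv u₀).inv s_10a942 := by
      refine ProgX.Base.abiInv_of ?_ ?_
      · rw [w_flags]
        simp only [X86.User.df_setStatus]
        exact w_df_10a7ac
      · rw [w_mxcsr]
        exact hmx
    have hcore2 := seg5_core_carry hcore _ _ _ hs he_room he_top (by omega) (by omega) (by omega) w_rip w_rsp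
      (w_kept.get .rbp rfl) (w_kept.get .r14 rfl) hremF (ProgX.Base.conv_code_in w_eq) habi
    have hir : DGifSlurp.IR _ H rest frames F R Hx
        { Fc with saved := some { s with imgs := init ++ [{ g with raster := some (r.toNat, n) }] } } m u₀ e ret s_10a942 := {
      at_ := {
        core := hcore2
        region := hregion
        gif := hgif
        pv := hpv
        inv := hinvC
        ok := hokC
      }
      lz := hlz2
      last := ⟨_, init, _, r.toNat, n, ⟨rfl, rfl, hL.done, hL.noext⟩, rfl, by rw [er12]; exact hr12⟩
      lt := by
        rw [hremF]
        exact hlt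
    }
    have hph : DGifSlurp.PassHead H rest frames F R Hx _ m 4 u₀ e ret s_10a942 := {
      ir := hir
      pass := by
        rw [w_r15]
        decide
    }
    exact ReachVia.done (Or.inr (Or.inl ⟨_, _, 4, hph⟩))
  · -- the exit from s_10a7b7
    -- the footprint since `v`: the two pushed return addresses (one slot), the store to `sp->RasterBits`
    have hs : Mem.SameExcept
      [⟨(e.reg .rsp).toNat - 160, (e.reg .rsp).toNat - 152⟩,
       ⟨sp.toNat + 32, sp.toNat + 32 + 8⟩] v.mem s_10a7b7.mem := by
      rw [w_mem]
      u_same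
    -- THE ADOPTION: the forest's last image gets the raster `(r, n)`
    have hown' := hown.perm (DGifSlurp.owned_set_raster Fc s init g r.toNat n hL.saved hL.imgs hgr).symm
    obtain ⟨hinvA, hokA, hremA⟩ := store_stack hinv hok ⟨hcur.1, hcur.2.1⟩ (e.reg .rsp - 160) 8 1091481
      (by u_omega) (by u_omega)
    have e32 : (sp + 32).toNat = s.arr + 56 * init.length + 32 := by u_omega
    have hrl := r.toNat_lt
    have hr : RasterAt (some (r.toNat, n)) (s.arr + 56 * init.length)
        ((v.mem.writeLE (e.reg .rsp - 160) 8 1091481).writeLE (sp + 32) 8 r.toNat) := by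
      have eW : SavedImage.ImageDesc.Width ((v.mem.writeLE (e.reg .rsp - 160) 8 1091481).writeLE (sp + 32) 8 r.toNat)
          (s.arr + 56 * init.length) = W := by
        rw [← hW, hr12]
        simp only [gfield]
        rw [rd_writeLE_disjoint _ _ _ _ _ _ (by u_omega) (by u_omega) (by u_omega)]
        rw [rd_writeLE_disjoint _ _ _ _ _ _ (by u_omega) (by u_omega) (by u_omega)]
      have eH : SavedImage.ImageDesc.Height ((v.mem.writeLE (e.reg .rsp - 160) 8 1091481).writeLE (sp + 32) 8 r.toNat)
          (s.arr + 56 * init.length) = Hh := by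
        rw [← hHh, hr12]
        simp only [gfield]
        rw [rd_writeLE_disjoint _ _ _ _ _ _ (by u_omega) (by u_omega) (by u_omega)]
        rw [rd_writeLE_disjoint _ _ _ _ _ _ (by u_omega) (by u_omega) (by u_omega)]
      unfold RasterAt
      simp only
      rw [eW, eH]
      refine ⟨?_, hn, hwpos, hhpos, hsize⟩
      simp only [gfield]
      rw [rd_writeLE_same _ (sp + 32) 8 r.toNat _ e32 (by decide)]
      omega
    obtain ⟨hinvB, hokB, hremB⟩ := seg5_store_raster (g' := { g with raster := some (r.toNat, n) }) hinvA hokA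
      ⟨hcur.1, hcur.2.1⟩ hL.saved hL.imgs rfl rfl (sp + 32) r.toNat e32 hr hown'
    obtain ⟨hinvC, hokC, hremC⟩ := store_stack hinvB hokB ⟨hcur.1, hcur.2.1⟩ (e.reg .rsp - 160) 8 1091505
      (by u_omega) (by u_omega)
    rw [← w_mem] at hinvC hokC hremC
    have hremF : rem R s_10a7b7.mem = rem R v.mem := (hremC.trans hremB).trans hremA
    clear hinvA hokA hremA hinvB hokB hremB hremC hr
    -- what the exit assertions say of the new memory
    have hlz2 : LZOK s_10a7b7.mem F.pv := by
      apply hlz.sameExcept hs (by omega)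
      intro w hw
      simp only [List.mem_cons, List.not_mem_nil, or_false] at hw
      rcases hw with rfl | rfl
      all_goals (simp only; omega)
    have er12 : s_10a7b7.reg .r12 = sp := (w_kept.get .r12 rfl).trans c_r12
    have hW2 : SavedImage.ImageDesc.Width s_10a7b7.mem sp.toNat = W := by
      rw [← hW]
      simp only [gfield]
      apply hs.rd _ _ (by omega)
      intro w hw
      simp only [List.mem_cons, List.not_mem_nil, or_false] at hw
      rcases hw with rfl | rfl
      all_goals (simp only; omega)
    have hH2 : SavedImage.ImageDesc.Height s_10a7b7.mem sp.toNat = Hh := by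
      rw [← hHh]
      simp only [gfield]
      apply hs.rd _ _ (by omega)
      intro w hw
      simp only [List.mem_cons, List.not_mem_nil, or_false] at hw
      rcases hw with rfl | rfl
      all_goals (simp only; omega)
    have habi : (conv u₀).inv s_10a7b7 := by
      refine ProgX.Base.abiInv_of ?_ ?_
      · rw [w_flags]
        simp only [X86.User.df_setStatus]
        exact w_df_10a7ac
      · rw [w_mxcsr]
        exact hmx
    have hcore2 := seg5_core_carry hcore _ _ _ hs he_room he_top (by omega) (by omega) (by omega) w_rip w_rsp
      (w_kept.get .rbp rfl) (w_kept.get .r14 rfl) hremF (ProgX.Base.conv_code_in w_eq) habi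
    have hir : DGifSlurp.IR _ H rest frames F R Hx
        { Fc with saved := some { s with imgs := init ++ [{ g with raster := some (r.toNat, n) }] } } m u₀ e ret s_10a7b7 := {
      at_ := {
        core := hcore2
        region := hregion
        gif := hgif
        pv := hpv
        inv := hinvC
        ok := hokC
      }
      lz := hlz2
      last := ⟨_, init, _, r.toNat, n, ⟨rfl, rfl, hL.done, hL.noext⟩, rfl, by rw [er12]; exact hr12⟩
      lt := by
        rw [hremF]
        exact hlt
    }
    have hni : DGifSlurp.NI H rest frames F R Hx _ m u₀ e ret s_10a7b7 := {
      ir := hir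
      r13 := by
        rw [er12, w_r13]
        simp only [gfield]
        rw [w_mem]
        rw [rd_writeLE_disjoint _ _ _ _ _ _ (by u_omega) (by u_omega) (by u_omega)]
        rw [rd_writeLE_same _ (sp + 32) 8 r.toNat _ (by u_omega) (by decide)]
        omega
      rbx := by
        rw [er12, hW2, hH2, w_kept.get .rbx rfl, c_rbx, hrbx]
        exact hn
    }
    exact ReachVia.done (Or.inl ⟨_, _, hni⟩)

/-- **10A78CH (ret8) … 10A8EDH, the allocation failed** (dgif_lib.c:1222-1227): `r13 = 0`, the checked store of NULL to
`sp->RasterBits` (the field held NULL: the forest is the same), `test r13, r13 ; je` taken (10A923H):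
`DGifDecreaseImageCounter(gif)` (the last image has no extension list; its post: the counted images are `init`, all complete),
`ebx = 0`, to the epilogue. -/
theorem seg5_null (Lay : Layout) (hLay : Lay.hi = 0x1000000) (μ : Microarch) (hμ : UserX.MicroOK μ) (u₀ : State)
    (hcode : HasCodeNat Lay u₀ Gif.L.DGifSlurp.entry Gif.Code.code_DGifSlurp.nat Gif.L.DGifSlurp.size)
    (H : Heap) (rest : List Obj) (frames : List (Nat × FrameLayout)) (F : Forest) (R : Rd) (Hx : Heap) (Fc : Forest)
    (m W Hh : Nat) (e : State) (ret : Word)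
    (h_asan_store8_noabort : Asan.SmallCheck Lay μ ProgX.Base.WayInv (ProgX.Base.CodeOK u₀) [.rax, .rcx, .rdx] 8
      ProgX.Base.L.__asan_store8_noabort.entry)
    (h_dec : ∀ (init : List Img) (g : Img), Calls Lay μ ProgX.Base.WayInv (ProgX.Base.conv u₀)
      Gif.L.DGifDecreaseImageCounter.entry
      (Gif.Spec.DGifDecreaseImageCounter.spec Hx rest (DGifSlurp.framesIn frames e) Fc R init g))
    (v : State) (hat : seg5_Ret8 H rest frames F R Hx Fc m W Hh u₀ e ret v) (hnull : v.reg .rax = 0) :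
    ReachVia Lay μ ProgX.Base.WayInv v (fun w =>
      (∃ (H' : Heap) (F' : Forest), DGifSlurp.NI H rest frames F R H' F' m u₀ e ret w) ∨
      (∃ (H' : Heap) (F' : Forest) (a : Nat), DGifSlurp.PassHead H rest frames F R H' F' m a u₀ e ret w) ∨
      DGifSlurp.Exit H rest frames F R u₀ e ret w) := by
  obtain ⟨hatt, hlz, hlast, hW, hHh, hwpos, hhpos, hsize, hrbx, hlt, hres⟩ := hat
  obtain ⟨hcore, hregion, hgif, hpv, hinv, hok⟩ := hatt
  obtain ⟨s, init, g, hL, hgr, hr12⟩ := hlast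
  have hdec := h_dec init g
  clear h_dec
  have he := hcore.entry
  v_entry he
  obtain ⟨henv, hrdi, hcomplete⟩ := hcore.pre
  have w_rip := hcore.rip
  have c_rsp : v.reg .rsp = e.reg .rsp - 152 := hcore.rsp
  have c_rbp : v.reg .rbp = e.reg .rdi := hcore.rbp
  have c_rax : v.reg .rax = 0 := hnull
  obtain ⟨sp, c_r12⟩ : ∃ z, v.reg .r12 = z := ⟨_, rfl⟩
  rw [c_r12] at hr12
  have w_kept : RegsKept [.rsp] v v := RegsKept.refl _ _
  have w_eq : Mem.EqOn ProgX.Base.L.textLo ProgX.Base.L.textHi u₀.mem v.mem := ProgX.Base.conv_code_eqOn hcore.code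
  have hdf := (show abiInv _ from hcore.abi).1
  have hmx := (show abiInv _ from hcore.abi).2
  have hsse := ProgX.Base.sseOK_of_abiInv hcore.abi
  have hcur := henv.ctx.cursor_range henv.heap.inv.shadow
  have hbase : Hx.base = 0x800000 := by
    rw [hregion.1]
    exact henv.heap.base
  have hlimit : Hx.limit = 0xC00000 := by
    rw [hregion.2]
    exact henv.heap.limit
  have hroom := hinv.heap.room
  rw [hbase, hlimit] at hroom
  obtain ⟨hlive, hcap, hoffg, hoffp, hlo, hhi⟩ := seg5_slot_geo hok hinv.heap ⟨hcur.1, hcur.2.1⟩ hL.saved hL.imgs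
  rw [hbase] at hlo hhi
  have hsame : Mem.SameExcept
    [⟨(e.reg .rsp).toNat - 848, (e.reg .rsp).toNat⟩,
     shadowSpan ((e.reg .rsp).toNat - 152) ((e.reg .rsp).toNat - 56),
     ⟨0x800000, 0x1000020⟩,
     ⟨R.cur, R.cur + 8⟩] e.mem v.mem := hcore.same
  have hal : LiveIn (Hx.liveObjs ++ rest) (DGifSlurp.framesIn frames e) s.arr (56 * s.cap) :=
    hlive.liveIn rest _ (Nat.le_refl _) (Nat.le_refl _)
  u_walk hcode [hμ.vendor] until [Gif.L.DGifSlurp.at_10a8ed] span [ProgX.Base.L.textLo, ProgX.Base.L.textHi] side (v_side)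
  case check_10a794 =>
    -- dgif_lib.c:1222 the store to `sp->RasterBits`: 8 bytes inside the live array
    have hun : ShadowUntouched v.mem s_10a794.mem := by v_untouched
    exact hal.accSmall hinv.shadow hun _ 8 (by decide) (by u_omega) (by u_omega)
  case call_inv =>
    v_inv
  case pre_10a926 =>
    -- DGifDecreaseImageCounter'S PRECONDITION: the three stores since `v` keep the invariants, the forest is the same
    obtain ⟨hinvA, hokA, hremA⟩ := store_stack hinv hok ⟨hcur.1, hcur.2.1⟩ (e.reg .rsp - 160) 8 1091481
      (by u_omega) (by u_omega)
    have e32 : (sp + 32).toNat = s.arr + 56 * init.length + 32 := by u_omega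
    have es : ({ s with imgs := init ++ [g] } : Saved) = s := by rw [← hL.imgs]
    have eF : ({ Fc with saved := some { s with imgs := init ++ [g] } } : Forest) = Fc := by rw [es, ← hL.saved]
    have hr : RasterAt g.raster (s.arr + 56 * init.length)
        ((v.mem.writeLE (e.reg .rsp - 160) 8 1091481).writeLE (sp + 32) 8 0) := by
      rw [hgr]
      unfold RasterAt
      simp only [gfield]
      exact (rd_writeLE_same _ (sp + 32) 8 0 _ e32 (by decide)).trans (by decide)
    obtain ⟨hinvB, hokB, hremB⟩ := seg5_store_raster (g' := g) hinvA hokA ⟨hcur.1, hcur.2.1⟩ hL.saved hL.imgs rfl rfl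
      (sp + 32) 0 e32 hr (by
        rw [eF]
        exact hok.owns)
    rw [eF] at hokB
    have hs : Mem.SameExcept [⟨(e.reg .rsp).toNat - 848, (e.reg .rsp).toNat - 152⟩]
        ((v.mem.writeLE (e.reg .rsp - 160) 8 1091481).writeLE (sp + 32) 8 0) s_10a926.mem := by
      rw [w_mem]
      refine Mem.SameExcept.writeLE _ _ _ 8 _ (by u_omega) ⟨_, List.mem_cons_self, ?_, ?_⟩
      · simp only
        u_omega
      · simp only
        u_omega
    have henv' := seg5_env_at_call henv hregion hinvB hokB hs (by omega) (by omega) (by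
      rw [w_rsp]
      u_omega) (by
      rw [w_rsp]
      u_omega) (by
      rw [w_rsp]
      u_omega)
    refine ⟨henv', ?_, ?_, hL.noext⟩
    · rw [w_rdi, hrdi, hgif]
    · unfold Forest.imgs
      rw [hL.saved]
      exact hL.imgs
  -- 10A92BH (ret24): DGifDecreaseImageCounter HAS RETURNED
  obtain ⟨H', F', hback, hsb, himgs, hremP⟩ := w_post
  have e_top : (s_10a926.reg .rsp).toNat + 8 = (e.reg .rsp).toNat - 152 := by
    rw [w_rsp_10a926]
    u_omega
  have hs0 : Mem.SameExcept
    [⟨(e.reg .rsp).toNat - 160, (e.reg .rsp).toNat - 152⟩,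
     ⟨sp.toNat + 32, sp.toNat + 32 + 8⟩] v.mem s_10a926.mem := by
    rw [w_mem_10a926]
    u_same
  have hrem0 : rem R s_10a926.mem = rem R v.mem := by
    apply rem_sameExcept hs0 (by omega)
    intro w hw
    simp only [List.mem_cons, List.not_mem_nil, or_false] at hw
    rcases hw with rfl | rfl
    all_goals (simp only; omega)
  clear hs0
  v_after_call w_rsp_10a926 w_mem_10a926
  have hs2 : Mem.SameExcept
    [⟨(e.reg .rsp).toNat - 848, (e.reg .rsp).toNat - 152⟩,
     ⟨0x800000, 0x1000020⟩] v.mem s_10a926r.mem := by u_same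
  have hinvF : HeapInv H' rest (DGifSlurp.framesIn frames e) ((e.reg .rsp).toNat - 152) s_10a926r.mem := by
    rw [← e_top]
    exact hback.inv
  have hokF := hback.ok
  have hremF : rem R s_10a926r.mem = rem R v.mem := hremP.trans hrem0
  clear w_same hsame
  u_walk hcode [hμ.vendor] until [Gif.L.DGifSlurp.at_10a8ed] span [ProgX.Base.L.textLo, ProgX.Base.L.textHi] side (v_side)
  -- 10A8EDH: the exit to the epilogue, with the heap and forest of DGifDecreaseImageCounter's post
  rw [← w_mem] at hs2 hinvF hokF hremF
  have habi : (conv u₀).inv s_10a930 := by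
    refine ProgX.Base.abiInv_of ?_ ?_
    · rw [w_flags]
      exact w_df
    · rw [w_mxcsr]
      exact w_mx
  have hcore2 := seg5_core_carry hcore _ _ _ hs2 he_room he_top (by omega) (by omega) (by omega) w_rip w_rsp
    (w_kept.get .rbp rfl) (w_kept.get .r14 rfl) hremF (ProgX.Base.conv_code_in w_eq) habi
  have hdone : DGifSlurp.Done H rest frames F R H' F' u₀ e ret s_10a930 := {
    at_ := {
      core := hcore2
      region := hregion.trans hback.region
      gif := hsb.1.trans hgif
      pv := hsb.2.1.trans hpv
      inv := hinvF
      ok := hokF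
    }
    complete := (DGifSlurp.complete_iff_imgs F').mpr (by
      rw [himgs]
      exact hL.done)
  }
  exact ReachVia.done (Or.inr (Or.inr ⟨H', F', hdone⟩))

end Gif.Spec.DGifSlurp_5
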